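-- pv_equiv track=rewrite | github.com/zepharaai/artifact | rtf_pipeline.py | make_order
-- ===== SOURCE A (Python) =====
-- from typing import List, Tuple, Iterable
--
-- def make_order(num_items:int, total_microbatches:int, microbatch:int) -> List[List[int]]:
--     # deterministic round-robin order with wrap-around
--     order = []
--     ptr = 0
--     for _ in range(total_microbatches):
--         mb = [(ptr + j) % num_items for j in range(microbatch)]
--         order.append(mb)
--         ptr = (ptr + microbatch) % num_items
--     return order
-- ===== SOURCE B (Python) =====
-- def make_order(num_items: int, total_microbatches: int, microbatch: int):
--     # closed form: row i starts at offset i*microbatch; no running pointer state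
--     return [[(i * microbatch + j) % num_items for j in range(microbatch)]
--             for i in range(total_microbatches)]
-- ===== Notes on version B (the rewrite author's own statement) =====
-- stated objective: simpler
-- what changed: Replaced the running ptr accumulator threaded across iterations by a closed-form per-row offset i*microbatch taken modulo num_items inside each element.
import Mathlib
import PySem

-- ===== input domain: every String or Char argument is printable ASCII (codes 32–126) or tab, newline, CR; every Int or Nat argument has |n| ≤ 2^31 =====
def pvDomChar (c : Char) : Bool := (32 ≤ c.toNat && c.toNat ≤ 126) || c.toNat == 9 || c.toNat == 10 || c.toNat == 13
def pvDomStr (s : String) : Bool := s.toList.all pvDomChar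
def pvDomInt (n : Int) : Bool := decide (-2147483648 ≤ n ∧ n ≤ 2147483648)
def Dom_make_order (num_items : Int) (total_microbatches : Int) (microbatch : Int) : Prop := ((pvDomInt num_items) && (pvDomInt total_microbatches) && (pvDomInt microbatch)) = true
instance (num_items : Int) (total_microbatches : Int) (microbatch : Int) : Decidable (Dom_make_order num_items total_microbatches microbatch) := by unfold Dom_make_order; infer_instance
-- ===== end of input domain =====

-- B replaces A's running `ptr` accumulator with a closed-form per-row offset i*microbatch (simpler decomposition, same cost).


-- ===== PORT A =====
-- literal port: loop over range(total_microbatches), state (order, ptr); Pre_ excludes the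
-- ZeroDivisionError of `% num_items` (PySem.Int.mod is total, but Pre_ keeps num_items ≠ 0 when the loop runs)
def make_order (num_items : Int) (total_microbatches : Int) (microbatch : Int) : List (List Int) :=
  ((PySem.List.pyRange 0 total_microbatches).foldl
    (fun (st : List (List Int) × Int) _ =>
      let mb := (PySem.List.pyRange 0 microbatch).map (fun j => PySem.Int.mod (st.2 + j) num_items)
      (st.1 ++ [mb], PySem.Int.mod (st.2 + microbatch) num_items))
    ([], 0)).1

-- ===== PORT B =====
-- literal port of Source B: closed form, row i = [(i*microbatch + j) % num_items for j in range(microbatch)]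
def make_order_alt (num_items : Int) (total_microbatches : Int) (microbatch : Int) : List (List Int) :=
  (PySem.List.pyRange 0 total_microbatches).map (fun i =>
    (PySem.List.pyRange 0 microbatch).map (fun j => PySem.Int.mod (i * microbatch + j) num_items))

-- ===== PRECONDITION & SPEC =====
-- Pre_ excludes exactly the inputs where A raises ZeroDivisionError: num_items == 0 with a non-empty loop.
def Pre_make_order (num_items : Int) (total_microbatches : Int) (microbatch : Int) : Prop :=
  num_items ≠ 0 ∨ total_microbatches ≤ 0
instance (num_items : Int) (total_microbatches : Int) (microbatch : Int) : Decidable (Pre_make_order num_items total_microbatches microbatch) := by unfold Pre_make_order; infer_instance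

def pvWitness_make_order : Int × Int × Int := (5, 3, 2)

def Spec_make_order (num_items : Int) (total_microbatches : Int) (microbatch : Int) (out : List (List Int)) : Prop := out = make_order_alt num_items total_microbatches microbatch
instance (num_items : Int) (total_microbatches : Int) (microbatch : Int) (out : List (List Int)) : Decidable (Spec_make_order num_items total_microbatches microbatch out) := by unfold Spec_make_order; infer_instance

-- ===== CLAIM (what is proved, stated in full; the proofs are below) =====
def Claim_equal_make_order : Prop := ∀ (num_items : Int) (total_microbatches : Int) (microbatch : Int), Dom_make_order num_items total_microbatches microbatch → Pre_make_order num_items total_microbatches microbatch → Spec_make_order num_items total_microbatches microbatch (make_order num_items total_microbatches microbatch)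

-- ===== LEMMAS AND PROOFS =====

-- Python's `%` depends only on the residue class of its left argument (for a nonzero divisor).
lemma pymod_congr (n a b : Int) (hn : n ≠ 0) (h : n ∣ a - b) :
    PySem.Int.mod a n = PySem.Int.mod b n := by
  have ha := PySem.Int.floordiv_mul_add_mod a n
  have hb := PySem.Int.floordiv_mul_add_mod b n
  have hd : n ∣ PySem.Int.mod a n - PySem.Int.mod b n := by
    have : PySem.Int.mod a n - PySem.Int.mod b n
        = (a - b) - (PySem.Int.floordiv a n - PySem.Int.floordiv b n) * n := by ring_nf; omega
    rw [this]
    exact dvd_sub h (Dvd.dvd.mul_left (dvd_refl n) _)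
  rcases lt_or_gt_of_ne hn with hneg | hpos
  · have b1 := PySem.Int.mod_neg_bounds a hneg
    have b2 := PySem.Int.mod_neg_bounds b hneg
    have := Int.eq_zero_of_abs_lt_dvd ((neg_dvd).mpr hd)
      (abs_lt.mpr ⟨by omega, by omega⟩)
    omega
  · have b1 := PySem.Int.mod_nonneg a hpos
    have b2 := PySem.Int.mod_lt a hpos
    have b3 := PySem.Int.mod_nonneg b hpos
    have b4 := PySem.Int.mod_lt b hpos
    have := Int.eq_zero_of_abs_lt_dvd hd (abs_lt.mpr ⟨by omega, by omega⟩)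
    omega

-- The loop invariant: starting from any pointer p congruent to i*m mod n, A's fold over
-- pyRange i (i+k) appends exactly B's rows for indices i, i+1, …, i+k-1.
lemma make_order_loop (n m : Int) (hn : n ≠ 0) :
    ∀ (k : Nat) (i : Int) (acc : List (List Int)) (p : Int), n ∣ p - i * m →
    ((PySem.List.pyRange i (i + (k : Int))).foldl
      (fun (st : List (List Int) × Int) _ =>
        let mb := (PySem.List.pyRange 0 m).map (fun j => PySem.Int.mod (st.2 + j) n)
        (st.1 ++ [mb], PySem.Int.mod (st.2 + m) n))
      (acc, p)).1
    = acc ++ (PySem.List.pyRange i (i + (k : Int))).map (fun r =>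
        (PySem.List.pyRange 0 m).map (fun j => PySem.Int.mod (r * m + j) n)) := by
  intro k
  induction k with
  | zero =>
    intro i acc p _
    simp [PySem.List.pyRange]
  | succ k ih =>
    intro i acc p hp
    have hlt : i < i + ((k : Int) + 1) := by omega
    rw [show (((k + 1 : Nat) : Int)) = (k : Int) + 1 by push_cast; ring] at *
    rw [PySem.List.pyRange_one_cons hlt]
    have hrow : ((PySem.List.pyRange 0 m).map (fun j => PySem.Int.mod (p + j) n))
        = (PySem.List.pyRange 0 m).map (fun j => PySem.Int.mod (i * m + j) n) := by
      apply List.map_congr_left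
      intro j _
      exact pymod_congr n (p + j) (i * m + j) hn (by
        have : p + j - (i * m + j) = p - i * m := by ring
        rw [this]; exact hp)
    have hnext : n ∣ PySem.Int.mod (p + m) n - (i + 1) * m := by
      have h1 := PySem.Int.floordiv_mul_add_mod (p + m) n
      have hx : (i + 1) * m = i * m + m := by ring
      have : PySem.Int.mod (p + m) n - (i + 1) * m
          = (p - i * m) - PySem.Int.floordiv (p + m) n * n := by linarith
      rw [this]
      exact dvd_sub hp (Dvd.dvd.mul_left (dvd_refl n) _)
    have hshift : i + ((k : Int) + 1) = (i + 1) + (k : Int) := by ring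
    simp only [List.foldl_cons, List.map_cons]
    rw [hshift]
    rw [ih (i + 1) (acc ++ [(PySem.List.pyRange 0 m).map (fun j => PySem.Int.mod (p + j) n)])
        (PySem.Int.mod (p + m) n) hnext]
    simp [hrow]

-- ===== VERDICT (by name: the statement is the Claim_ definition above) =====
theorem make_order_spec : Claim_equal_make_order := by
  intro n t m _ hpre
  unfold Spec_make_order make_order make_order_alt
  by_cases ht : t ≤ 0
  · have : PySem.List.pyRange 0 t = [] := by
      simp [PySem.List.pyRange]; omega
    simp [this]
  · have hn : n ≠ 0 := by
      rcases hpre with h | h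
      · exact h
      · omega
    have htnat : (0 : Int) + ((t.toNat : Nat) : Int) = t := by omega
    have := make_order_loop n m hn t.toNat 0 [] 0 (by simp)
    rw [htnat] at this
    simpa using this
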